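-- pv_equiv track=rewrite | github.com/Oxymoron957/Algorithm_Practice | programmers/toss/2.PY | solution
-- ===== SOURCE A (Python) =====
-- def solution(servers, sticky, requests):
--     server = {}
--     for s in range(1, servers+1):
--         server[s] = []
--
--     if sticky:
--         turn = 1
--         for r in requests:
--             isSticky = False
--             for key, li in enumerate(server.values()):
--                 key+=1
--                 if r in li:
--                     server.get(key).append(r)
--                     isSticky = True
--                     break
--             if not isSticky:
--                 server.get(turn).append(r)
--                 turn += 1
--                 if turn > servers:
--                     turn = 1
--
--
--     else:
--         turn = 1
--         for r in requests:
--             server.get(turn).append(r)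
--             turn += 1
--             if turn > servers:
--                 turn = 1
--
--     return list(server.values())
-- ===== SOURCE B (Python) =====
-- def solution(servers, sticky, requests):
--     if sticky:
--         assign = {}
--         for r in requests:
--             if r not in assign:
--                 assign[r] = len(assign) % servers + 1
--         return [[r for r in requests if assign[r] == s]
--                 for s in range(1, servers + 1)]
--     else:
--         return [[r for i, r in enumerate(requests) if i % servers == s - 1]
--                 for s in range(1, servers + 1)]
-- ===== Notes on version B (the rewrite author's own statement) =====
-- stated objective: alternative
-- what changed: A routes each request in one stateful pass over requests, appending into per-server lists while scanning all server lists for sticky hits and cycling a turn counter; B first builds a first-appearance assignment table (distinct value -> ordinal % servers + 1) and then produces each server's list by filtering the requests (sticky) or the enumerated indices (non-sticky) per server.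
import Mathlib
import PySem

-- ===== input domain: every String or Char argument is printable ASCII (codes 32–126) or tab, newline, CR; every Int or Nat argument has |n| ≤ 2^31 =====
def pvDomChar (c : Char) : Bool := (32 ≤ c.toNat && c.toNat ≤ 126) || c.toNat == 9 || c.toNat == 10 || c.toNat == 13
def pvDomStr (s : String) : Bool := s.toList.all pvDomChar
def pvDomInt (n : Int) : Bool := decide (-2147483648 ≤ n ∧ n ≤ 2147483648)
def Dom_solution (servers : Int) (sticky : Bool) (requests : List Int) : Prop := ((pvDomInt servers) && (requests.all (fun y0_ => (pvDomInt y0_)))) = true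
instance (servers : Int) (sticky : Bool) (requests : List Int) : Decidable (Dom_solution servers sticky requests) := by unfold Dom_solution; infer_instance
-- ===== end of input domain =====

-- B replaces A's single stateful appending pass over the requests with a first pass building an
-- assignment table plus a per-server filtering pass (objective: alternative decomposition, same cost).


-- ===== PORT A =====
-- server = {}; for s in range(1, servers+1): server[s] = []
def solutionInit (servers : Int) : PySem.Dict Int (List Int) :=
  (PySem.List.pyRange 1 (servers + 1)).foldl (fun d s => d.insert s []) PySem.Dict.empty

-- one iteration of A's sticky loop body; the inner 'for key, li in enumerate(server.values())
-- ... if r in li: server.get(key).append(r); break' search-with-break is ported as findIdx? over the values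
def solutionStepSticky (servers : Int) (st : PySem.Dict Int (List Int) × Int) (r : Int) :
    PySem.Dict Int (List Int) × Int :=
  match (st.1.values).findIdx? (fun li => li.contains r) with
  | some key => (st.1.modify ((key : Int) + 1) [] (fun li => li ++ [r]), st.2)
  | none =>
      let turn := st.2 + 1
      (st.1.modify st.2 [] (fun li => li ++ [r]), if turn > servers then 1 else turn)

-- one iteration of A's non-sticky loop body
def solutionStepRR (servers : Int) (st : PySem.Dict Int (List Int) × Int) (r : Int) :
    PySem.Dict Int (List Int) × Int :=
  let turn := st.2 + 1
  (st.1.modify st.2 [] (fun li => li ++ [r]), if turn > servers then 1 else turn)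

def solution (servers : Int) (sticky : Bool) (requests : List Int) : List (List Int) :=
  let server := solutionInit servers
  if sticky then
    ((requests.foldl (solutionStepSticky servers) (server, 1)).1).values
  else
    ((requests.foldl (solutionStepRR servers) (server, 1)).1).values

-- ===== PORT B =====
-- assign = {}; for r in requests: if r not in assign: assign[r] = len(assign) % servers + 1
def solutionAssign (servers : Int) (requests : List Int) : PySem.Dict Int Int :=
  requests.foldl
    (fun d r => if d.contains r then d else d.insert r (PySem.Int.mod (d.size : Int) servers + 1))
    PySem.Dict.empty

def solution_alt (servers : Int) (sticky : Bool) (requests : List Int) : List (List Int) :=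
  if sticky then
    let assign := solutionAssign servers requests
    (PySem.List.pyRange 1 (servers + 1)).map
      (fun s => requests.filter (fun r => assign.getD r 0 == s))
  else
    (PySem.List.pyRange 1 (servers + 1)).map
      (fun s => ((PySem.List.enumerate requests).filter
        (fun q => PySem.Int.mod q.1 servers == s - 1)).map Prod.snd)

-- ===== PRECONDITION & SPEC =====
-- Pre_ excludes exactly servers ≤ 0 with a non-empty request list: there A's dict has no keys,
-- server.get(turn) is None, and A raises AttributeError on the first request.
def Pre_solution (servers : Int) (sticky : Bool) (requests : List Int) : Prop :=
  1 ≤ servers ∨ requests = []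
instance (servers : Int) (sticky : Bool) (requests : List Int) : Decidable (Pre_solution servers sticky requests) := by unfold Pre_solution; infer_instance
def pvWitness_solution : Int × Bool × List Int := (3, true, [1, 2, 3, 1, 2])

def Spec_solution (servers : Int) (sticky : Bool) (requests : List Int) (out : List (List Int)) : Prop := out = solution_alt servers sticky requests
instance (servers : Int) (sticky : Bool) (requests : List Int) (out : List (List Int)) : Decidable (Spec_solution servers sticky requests out) := by unfold Spec_solution; infer_instance

-- ===== CLAIM (what is proved, stated in full; the proofs are below) =====
def Claim_equal_solution : Prop := ∀ (servers : Int) (sticky : Bool) (requests : List Int), Dom_solution servers sticky requests → Pre_solution servers sticky requests → Spec_solution servers sticky requests (solution servers sticky requests)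

-- ===== LEMMAS AND PROOFS =====

-- the key list 1..servers of A's dict
def pvRng (n : Int) : List Int := PySem.List.pyRange 1 (n + 1)

-- the distinct requests in first-appearance order
def pvS (p : List Int) : List Int := PySem.Set.ofList p

-- the server a request r (with first-appearance ordinal idxOf r F) is routed to
def pvSkey (n : Int) (F : List Int) (r : Int) : Int :=
  PySem.Int.mod ((List.idxOf r F : Nat) : Int) n + 1

lemma pvRange_eq (m : Nat) : ∀ (a : Int),
    PySem.List.pyRange a (a + m) = (List.range m).map (fun k : Nat => a + (k : Int)) := by
  induction m with
  | zero => intro a; simp [PySem.List.pyRange]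
  | succ m ih =>
      intro a
      have h1 : a + (m + 1 : Nat) = (a + m) + 1 := by push_cast; ring
      rw [h1, PySem.List.pyRange_one_succ_right (by omega), ih a, List.range_succ]
      simp

lemma pvRng_eq (n : Int) (h : 0 ≤ n) :
    pvRng n = (List.range n.toNat).map (fun k : Nat => 1 + (k : Int)) := by
  have h1 : (1 : Int) + (n.toNat : Nat) = n + 1 := by omega
  unfold pvRng
  rw [← h1, pvRange_eq]

lemma pvRng_nil (n : Int) (h : n < 0) : pvRng n = [] := by
  unfold pvRng
  simp [PySem.List.pyRange]
  intro hc; omega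

lemma pvRng_nodup (n : Int) : (pvRng n).Nodup := by
  by_cases h : 0 ≤ n
  · rw [pvRng_eq n h]
    apply List.Nodup.map _ List.nodup_range
    intro a b hab; simp at hab; omega
  · simp [pvRng_nil n (by omega)]

lemma mem_pvRng {n s : Int} : s ∈ pvRng n ↔ 1 ≤ s ∧ s < n + 1 := PySem.List.mem_pyRange_one

lemma init_items (n : Int) :
    (solutionInit n).items = (pvRng n).map (fun s => (s, ([] : List Int))) := by
  unfold solutionInit
  have := PySem.Dict.items_foldl_insert_fresh (l := pvRng n) (k := fun s => s)
    (v := fun _ => ([] : List Int)) (d := PySem.Dict.empty)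
    (by intro a _; exact PySem.Dict.contains_empty a)
    (by simpa using pvRng_nodup n)
  simpa [pvRng] using this

lemma init_keys (n : Int) : (solutionInit n).keys = pvRng n := by
  simp only [PySem.Dict.keys, init_items, List.map_map]
  simp [Function.comp_def]

lemma init_getD (n : Int) (s : Int) : (solutionInit n).getD s [] = [] := by
  by_cases h : s ∈ pvRng n
  · exact PySem.Dict.getD_of_mem_items _ (by rw [init_items]; exact List.mem_map_of_mem h)
      (by rw [init_keys]; exact pvRng_nodup n) []
  · exact PySem.Dict.getD_of_not_contains _ []
      (by rw [PySem.Dict.contains_eq_decide_mem_keys, init_keys]; simpa using h)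

lemma turn_step (n m : Int) (hn : 1 ≤ n) :
    (if n < PySem.Int.mod m n + 1 + 1 then 1 else PySem.Int.mod m n + 1 + 1)
      = PySem.Int.mod (m + 1) n + 1 := by
  rw [PySem.Int.mod_eq_emod_of_pos (by omega), PySem.Int.mod_eq_emod_of_pos (by omega)]
  have h1 : 0 ≤ m % n := Int.emod_nonneg m (by omega)
  have h2 : m % n < n := Int.emod_lt_of_pos m (by omega)
  have hd : m + 1 = (m % n + 1) + n * (m / n) := by
    have := Int.emod_add_mul_ediv m n; omega
  rw [hd, Int.add_mul_emod_self_left]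
  by_cases hc : m % n + 1 < n
  · rw [Int.emod_eq_of_lt (by omega) hc]; split_ifs <;> omega
  · have he : m % n + 1 = n := by omega
    rw [he, Int.emod_self]; split_ifs <;> omega

lemma turn_mem (n : Int) (hn : 1 ≤ n) (m : Int) : PySem.Int.mod m n + 1 ∈ pvRng n := by
  have h1 := PySem.Int.mod_nonneg m (b := n) (by omega)
  have h2 := PySem.Int.mod_lt m (b := n) (by omega)
  exact mem_pvRng.2 (by omega)

lemma keys_modify_mem (n : Int) (d : PySem.Dict Int (List Int)) (hk : d.keys = pvRng n)
    (t : Int) (ht : t ∈ pvRng n) (f : List Int → List Int) :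
    (d.modify t [] f).keys = pvRng n := by
  rw [PySem.Dict.keys_modify,
    PySem.Dict.keys_insert_of_contains _ _
      (by rw [PySem.Dict.contains_eq_decide_mem_keys, hk]; simpa), hk]

lemma pvSkey_bounds (n : Int) (hn : 1 ≤ n) (F : List Int) (r : Int) :
    1 ≤ pvSkey n F r ∧ pvSkey n F r ≤ n := by
  have h1 := PySem.Int.mod_nonneg ((List.idxOf r F : Nat) : Int) (b := n) (by omega)
  have h2 := PySem.Int.mod_lt ((List.idxOf r F : Nat) : Int) (b := n) (by omega)
  unfold pvSkey; omega

lemma findIdx?_eq_some_of_unique {α : Type} (l : List α) (p : α → Bool) (j : Nat)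
    (hj : j < l.length) (hpj : p l[j] = true)
    (ho : ∀ i, (h : i < l.length) → p l[i] = true → i = j) :
    l.findIdx? p = some j := by
  induction l generalizing j with
  | nil => simp at hj
  | cons x xs ih =>
      rw [List.findIdx?_cons]
      cases j with
      | zero => simp_all
      | succ k =>
          have hx : p x = false := by
            by_contra hpx
            have := ho 0 (by simp) (by simpa using Bool.of_not_eq_false hpx)
            omega
          rw [if_neg (by simp [hx])]
          have := ih k (by simpa using hj) (by simpa using hpj)
            (fun i hi hpi => by
              have := ho (i + 1) (by simpa using hi) (by simpa using hpi); omega)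
          simp [this]

lemma ofList_append_singleton (p : List Int) (r : Int) :
    PySem.Set.ofList (p ++ [r]) = PySem.Set.add (PySem.Set.ofList p) r := by
  rw [PySem.Set.ofList_eq_foldl, PySem.Set.ofList_eq_foldl, List.foldl_append]
  rfl

lemma set_add_of_mem {F : List Int} {r : Int} (h : r ∈ F) :
    PySem.Set.add F r = F := by
  simp [PySem.Set.add, PySem.Set.contains, h]

lemma set_add_of_not_mem {F : List Int} {r : Int} (h : r ∉ F) :
    PySem.Set.add F r = F ++ [r] := by
  simp [PySem.Set.add, PySem.Set.contains, h]

lemma values_of_inv (n : Int) (d : PySem.Dict Int (List Int))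
    (hk : d.keys = pvRng n) :
    d.values = (pvRng n).map (fun s => d.getD s []) := by
  rw [PySem.Dict.values_eq_map_keys d (by rw [hk]; exact pvRng_nodup n) [], hk]

-- ---------- sticky branch ----------

def InvS (n : Int) (p : List Int) (st : PySem.Dict Int (List Int) × Int) : Prop :=
  st.1.keys = pvRng n ∧
  (∀ s : Int, st.1.getD s [] = p.filter (fun r => pvSkey n (pvS p) r == s)) ∧
  st.2 = PySem.Int.mod (((pvS p).length : Nat) : Int) n + 1

lemma invS_nil (n : Int) (hn : 1 ≤ n) : InvS n [] (solutionInit n, 1) := by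
  refine ⟨init_keys n, fun s => by simpa using init_getD n s, ?_⟩
  have : PySem.Int.mod 0 n = 0 := by
    rw [PySem.Int.mod_eq_emod_of_pos (by omega)]; simp
  simp [pvS, PySem.Set.ofList_eq_foldl, this]

lemma invS_step (n : Int) (hn : 1 ≤ n) (p : List Int) (r : Int)
    (st : PySem.Dict Int (List Int) × Int) (h : InvS n p st) :
    InvS n (p ++ [r]) (solutionStepSticky n st r) := by
  obtain ⟨d, t⟩ := st
  obtain ⟨h1, h2, h3⟩ := h
  simp only at h1 h2 h3
  have h0n : 0 ≤ n := by omega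
  have hvals := values_of_inv n d h1
  by_cases hr : r ∈ p
  · -- r was seen before: A appends it to the server already holding it
    have hrF : r ∈ pvS p := (PySem.Set.mem_ofList p r).2 hr
    obtain ⟨ha1, ha2⟩ := pvSkey_bounds n hn (pvS p) r
    have hpred : ∀ s : Int, ((d.getD s []).contains r) = decide (pvSkey n (pvS p) r = s) := by
      intro s
      rw [h2 s]
      by_cases hc : pvSkey n (pvS p) r = s
      · simp only [hc, decide_true]
        exact List.contains_iff_mem.mpr (List.mem_filter.2 ⟨hr, by simp [hc]⟩)
      · simp only [hc, decide_false]
        rw [Bool.eq_false_iff]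
        intro hcon
        exact hc (by simpa using (List.mem_filter.1 (List.contains_iff_mem.mp hcon)).2)
    have hfind : (d.values).findIdx? (fun li => li.contains r)
        = some ((pvSkey n (pvS p) r - 1).toNat) := by
      rw [hvals, List.findIdx?_map, pvRng_eq n h0n, List.findIdx?_map]
      refine findIdx?_eq_some_of_unique _ _ ((pvSkey n (pvS p) r - 1).toNat) ?_ ?_ ?_
      · simpa using (by omega : (pvSkey n (pvS p) r - 1).toNat < n.toNat)
      · simp only [Function.comp_apply, List.getElem_range, hpred, decide_eq_true_eq]
        omega
      · intro i hi hpi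
        simp only [Function.comp_apply, List.getElem_range, hpred, decide_eq_true_eq] at hpi
        simp only [List.length_range] at hi
        omega
    have hcast : (((pvSkey n (pvS p) r - 1).toNat : Nat) : Int) + 1 = pvSkey n (pvS p) r := by
      omega
    have hstep : solutionStepSticky n (d, t) r
        = (d.modify ((((pvSkey n (pvS p) r - 1).toNat : Nat) : Int) + 1) [] (fun li => li ++ [r]), t) := by
      unfold solutionStepSticky
      rw [hfind]
    rw [hstep, hcast]
    have hFnew : pvS (p ++ [r]) = pvS p := by
      unfold pvS
      rw [ofList_append_singleton]
      exact set_add_of_mem hrF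
    refine ⟨keys_modify_mem n d h1 _ (mem_pvRng.2 (by omega)) _, ?_, ?_⟩
    · intro s
      have hmod := PySem.Dict.getD_modify d (pvSkey n (pvS p) r) s [] (fun li => li ++ [r])
      simp only
      rw [hmod, List.filter_append, hFnew]
      by_cases hs : s = pvSkey n (pvS p) r
      · subst hs
        rw [if_pos rfl, h2]
        simp
      · rw [if_neg hs, h2]
        have hb : (pvSkey n (pvS p) r == s) = false := by simp; omega
        simp [hb]
    · simpa [hFnew] using h3
  · -- a new request: A appends it to server `turn`
    have hrF : r ∉ pvS p := fun hc => hr ((PySem.Set.mem_ofList p r).1 hc)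
    have hfind : (d.values).findIdx? (fun li => li.contains r) = none := by
      rw [hvals, List.findIdx?_eq_none_iff]
      intro li hli
      obtain ⟨s, _, rfl⟩ := List.mem_map.1 hli
      rw [h2 s, Bool.eq_false_iff]
      intro hcon
      exact hr (List.mem_filter.1 (List.contains_iff_mem.mp hcon)).1
    have hstep : solutionStepSticky n (d, t) r
        = (d.modify t [] (fun li => li ++ [r]), if n < t + 1 then 1 else t + 1) := by
      unfold solutionStepSticky
      rw [hfind]
    rw [hstep]
    have hFnew : pvS (p ++ [r]) = pvS p ++ [r] := by
      unfold pvS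
      rw [ofList_append_singleton]
      exact set_add_of_not_mem hrF
    have hidx : ∀ x ∈ p, pvSkey n (pvS (p ++ [r])) x = pvSkey n (pvS p) x := by
      intro x hx
      have hxm : x ∈ pvS p := (PySem.Set.mem_ofList p x).2 hx
      unfold pvSkey
      rw [hFnew, List.idxOf_append, if_pos hxm]
    have hidxr : pvSkey n (pvS (p ++ [r])) r = t := by
      unfold pvSkey
      rw [hFnew, List.idxOf_append, if_neg hrF, h3]
      simp
    refine ⟨keys_modify_mem n d h1 t (h3 ▸ turn_mem n hn _) _, ?_, ?_⟩
    · intro s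
      have hmod := PySem.Dict.getD_modify d t s [] (fun li => li ++ [r])
      simp only
      rw [hmod, List.filter_append]
      have hfp : p.filter (fun x => pvSkey n (pvS (p ++ [r])) x == s)
          = p.filter (fun x => pvSkey n (pvS p) x == s) :=
        List.filter_congr (fun x hx => by rw [hidx x hx])
      rw [hfp]
      by_cases hs : s = t
      · subst hs
        rw [if_pos rfl, h2]
        simp [hidxr]
      · rw [if_neg hs, h2]
        have hb : (pvSkey n (pvS (p ++ [r])) r == s) = false := by
          simp [hidxr]; omega
        simp [hb]
    · simp only
      have hl : (((pvS (p ++ [r])).length : Nat) : Int) = ((pvS p).length : Int) + 1 := by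
        rw [hFnew]; simp
      rw [hl, ← turn_step n _ hn, h3]

lemma invS_foldl (n : Int) (hn : 1 ≤ n) :
    ∀ (q p : List Int) (st : PySem.Dict Int (List Int) × Int), InvS n p st →
      InvS n (p ++ q) (q.foldl (solutionStepSticky n) st) := by
  intro q
  induction q with
  | nil => intro p st h; simpa using h
  | cons r q ih =>
      intro p st h
      have h' := invS_step n hn p r st h
      have := ih (p ++ [r]) _ h'
      simpa [List.append_assoc] using this

-- ---------- B's assignment table ----------

def InvB (n : Int) (F : List Int) (d : PySem.Dict Int Int) : Prop :=
  d.keys = F ∧ F.Nodup ∧ d.size = F.length ∧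
  (∀ r : Int, d.getD r 0 = if r ∈ F then pvSkey n F r else 0)

lemma invB_step (n : Int) (F : List Int) (d : PySem.Dict Int Int) (r : Int)
    (h : InvB n F d) :
    InvB n (PySem.Set.add F r)
      (if d.contains r then d else d.insert r (PySem.Int.mod (d.size : Int) n + 1)) := by
  obtain ⟨hk, hnd, hsz, hg⟩ := h
  have hc : d.contains r = decide (r ∈ F) := by
    rw [PySem.Dict.contains_eq_decide_mem_keys, hk]
  by_cases hr : r ∈ F
  · rw [set_add_of_mem hr, hc, if_pos (by simpa using hr)]
    exact ⟨hk, hnd, hsz, hg⟩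
  · rw [set_add_of_not_mem hr, hc, if_neg (by simpa using hr)]
    have hcf : d.contains r = false := by rw [hc]; simpa using hr
    refine ⟨?_, ?_, ?_, ?_⟩
    · rw [PySem.Dict.keys_insert_of_not_contains _ _ hcf, hk]
    · simp [List.nodup_append, hnd]
      exact fun a ha hc => hr (hc ▸ ha)
    · rw [PySem.Dict.size_insert, if_neg (by simp [hcf]), hsz]; simp
    · intro x
      rw [PySem.Dict.getD_insert]
      by_cases hx : x = r
      · subst hx
        rw [if_pos rfl, if_pos (by simp)]
        unfold pvSkey
        rw [List.idxOf_append, if_neg hr, hsz]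
        simp
      · rw [if_neg hx, hg x]
        by_cases hxF : x ∈ F
        · rw [if_pos hxF, if_pos (by simp [hxF])]
          unfold pvSkey
          rw [List.idxOf_append, if_pos hxF]
        · rw [if_neg hxF, if_neg (by simp [hxF, hx])]

lemma invB_foldl (n : Int) :
    ∀ (q F : List Int) (d : PySem.Dict Int Int), InvB n F d →
      InvB n (PySem.Set.update F q)
        (q.foldl (fun d r => if d.contains r then d
            else d.insert r (PySem.Int.mod (d.size : Int) n + 1)) d) := by
  intro q
  induction q with
  | nil => intro F d h; exact h
  | cons r q ih =>
      intro F d h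
      exact ih (PySem.Set.add F r) _ (invB_step n F d r h)

lemma assign_inv (n : Int) (requests : List Int) :
    InvB n (pvS requests) (solutionAssign n requests) := by
  have h0 : InvB n [] PySem.Dict.empty := by
    refine ⟨PySem.Dict.keys_empty, List.nodup_nil, PySem.Dict.size_empty, fun r => by
      simp [PySem.Dict.getD_empty]⟩
  have := invB_foldl n requests [] PySem.Dict.empty h0
  have hupd : PySem.Set.update ([] : List Int) requests = pvS requests := by
    rw [pvS, PySem.Set.ofList_eq_foldl]; rfl
  rw [hupd] at this
  exact this

-- ---------- non-sticky branch ----------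

def InvR (n : Int) (p : List Int) (st : PySem.Dict Int (List Int) × Int) : Prop :=
  st.1.keys = pvRng n ∧
  (∀ s : Int, st.1.getD s [] =
    ((PySem.List.enumerate p).filter (fun q => PySem.Int.mod q.1 n == s - 1)).map Prod.snd) ∧
  st.2 = PySem.Int.mod ((p.length : Nat) : Int) n + 1

lemma invR_nil (n : Int) (hn : 1 ≤ n) : InvR n [] (solutionInit n, 1) := by
  refine ⟨init_keys n, fun s => by simp [init_getD n s, PySem.List.enumerate_nil], ?_⟩
  have : PySem.Int.mod 0 n = 0 := by
    rw [PySem.Int.mod_eq_emod_of_pos (by omega)]; simp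
  simp [this]

lemma invR_step (n : Int) (hn : 1 ≤ n) (p : List Int) (r : Int)
    (st : PySem.Dict Int (List Int) × Int) (h : InvR n p st) :
    InvR n (p ++ [r]) (solutionStepRR n st r) := by
  obtain ⟨d, t⟩ := st
  obtain ⟨h1, h2, h3⟩ := h
  simp only at h1 h2 h3
  have ht : t ∈ pvRng n := h3 ▸ turn_mem n hn _
  refine ⟨keys_modify_mem n d h1 t ht _, ?_, ?_⟩
  · intro s
    have hmod := PySem.Dict.getD_modify d t s [] (fun li => li ++ [r])
    simp only [solutionStepRR]
    rw [hmod]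
    rw [PySem.List.enumerate_append, PySem.List.enumerate_cons, PySem.List.enumerate_nil,
      List.filter_append, List.map_append]
    simp only [zero_add]
    have hql : PySem.Int.mod ((p.length : Int)) n = t - 1 := by
      rw [h3]; ring_nf
    by_cases hs : s = t
    · subst hs
      rw [if_pos rfl, h2 s]
      have hb : (PySem.Int.mod ((p.length : Int)) n == s - 1) = true := by
        rw [hql]; simp
      simp [hb]
    · rw [if_neg hs, h2 s]
      have hb : (PySem.Int.mod ((p.length : Int)) n == s - 1) = false := by
        rw [hql]; simp; omega
      simp [hb]
  · simp only [solutionStepRR]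
    rw [h3]
    have hts := turn_step n (p.length : Int) hn
    have hl : (((p ++ [r]).length : Nat) : Int) = (p.length : Int) + 1 := by simp
    simp only [gt_iff_lt]
    rw [hl, ← hts]

lemma invR_foldl (n : Int) (hn : 1 ≤ n) :
    ∀ (q p : List Int) (st : PySem.Dict Int (List Int) × Int), InvR n p st →
      InvR n (p ++ q) (q.foldl (solutionStepRR n) st) := by
  intro q
  induction q with
  | nil => intro p st h; simpa using h
  | cons r q ih =>
      intro p st h
      have h' := invR_step n hn p r st h
      have := ih (p ++ [r]) _ h'
      simpa [List.append_assoc] using this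

-- ---------- assembly ----------

lemma sticky_case (n : Int) (hn : 1 ≤ n) (requests : List Int) :
    solution n true requests = solution_alt n true requests := by
  obtain ⟨h1, h2, _⟩ :=
    (by simpa using invS_foldl n hn requests [] (solutionInit n, 1) (invS_nil n hn) :
      InvS n requests (requests.foldl (solutionStepSticky n) (solutionInit n, 1)))
  obtain ⟨_, _, _, hg⟩ := assign_inv n requests
  show ((requests.foldl (solutionStepSticky n) (solutionInit n, 1)).1).values = _
  rw [values_of_inv n _ h1]
  unfold solution_alt
  show (pvRng n).map _ = (pvRng n).map _
  apply List.map_congr_left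
  intro s _
  rw [h2 s]
  apply List.filter_congr
  intro x hx
  have hxm : x ∈ pvS requests := (PySem.Set.mem_ofList requests x).2 hx
  rw [hg x, if_pos hxm]

lemma rr_case (n : Int) (hn : 1 ≤ n) (requests : List Int) :
    solution n false requests = solution_alt n false requests := by
  obtain ⟨h1, h2, _⟩ :=
    (by simpa using invR_foldl n hn requests [] (solutionInit n, 1) (invR_nil n hn) :
      InvR n requests (requests.foldl (solutionStepRR n) (solutionInit n, 1)))
  show ((requests.foldl (solutionStepRR n) (solutionInit n, 1)).1).values = _
  rw [values_of_inv n _ h1]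
  unfold solution_alt
  simp only [if_neg Bool.false_ne_true]
  show (pvRng n).map _ = (pvRng n).map _
  exact List.map_congr_left (fun s _ => h2 s)

lemma nil_case (n : Int) (sticky : Bool) :
    solution n sticky [] = solution_alt n sticky [] := by
  have hA : solution n sticky [] = (solutionInit n).values := by
    cases sticky <;> rfl
  have hv : (solutionInit n).values = (pvRng n).map (fun _ => []) := by
    rw [values_of_inv n _ (init_keys n)]
    exact List.map_congr_left (fun s _ => init_getD n s)
  have hB : solution_alt n sticky [] = (pvRng n).map (fun _ => []) := by
    cases sticky <;> simp [solution_alt, pvRng, PySem.List.enumerate_nil]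
  rw [hA, hv, hB]

-- ===== VERDICT (by name: the statement is the Claim_ definition above) =====
theorem solution_spec : Claim_equal_solution := by
  intro servers sticky requests _ hpre
  unfold Spec_solution
  rcases hpre with hn | hnil
  · cases sticky
    · exact rr_case servers hn requests
    · exact sticky_case servers hn requests
  · subst hnil; exact nil_case servers sticky
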